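-- pv_equiv track=rewrite | github.com/KLiehr/WS2122---Feature-Aggregation-and-Clustering | ProjectApp/add_Attributes/add_D1.py | prevValue
-- ===== SOURCE A (Python) =====
-- def prevValue(trace, event, attr):
--     '''returns the value of an attribute at time of a given event excluding itself'''
--     # denotes the latest value of the attribute
--     attr_Value = 'NotAssigned'
--     # denotes if we are before the event
--     before = True
--
--
--     for ev in trace:
--
--         # update before
--         if ev == event:
--             before = False
--
--         if before:
--             # if the current event has the attribute, update attr_Value
--             if attr in ev:
--                 attr_Value = ev[attr]
--         else:
--             return attr_Value
--
--     return attr_Value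
-- ===== SOURCE B (Python) =====
-- def prevValue(trace, event, attr):
--     '''returns the value of an attribute at time of a given event excluding itself'''
--     events = list(trace)
--     # cutoff: index of the first occurrence of `event`, or the full length if absent
--     cut = next((i for i, ev in enumerate(events) if ev == event), len(events))
--     # latest assignment of attr strictly before the cutoff
--     for ev in reversed(events[:cut]):
--         if attr in ev:
--             return ev[attr]
--     return 'NotAssigned'
-- ===== Notes on version B (the rewrite author's own statement) =====
-- stated objective: alternative
-- what changed: Replaces A's forward scan with a running last-value variable and a before-flag by locating the cutoff index of the first matching event and then scanning the prefix backwards for the first event carrying the attribute.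
import Mathlib
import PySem

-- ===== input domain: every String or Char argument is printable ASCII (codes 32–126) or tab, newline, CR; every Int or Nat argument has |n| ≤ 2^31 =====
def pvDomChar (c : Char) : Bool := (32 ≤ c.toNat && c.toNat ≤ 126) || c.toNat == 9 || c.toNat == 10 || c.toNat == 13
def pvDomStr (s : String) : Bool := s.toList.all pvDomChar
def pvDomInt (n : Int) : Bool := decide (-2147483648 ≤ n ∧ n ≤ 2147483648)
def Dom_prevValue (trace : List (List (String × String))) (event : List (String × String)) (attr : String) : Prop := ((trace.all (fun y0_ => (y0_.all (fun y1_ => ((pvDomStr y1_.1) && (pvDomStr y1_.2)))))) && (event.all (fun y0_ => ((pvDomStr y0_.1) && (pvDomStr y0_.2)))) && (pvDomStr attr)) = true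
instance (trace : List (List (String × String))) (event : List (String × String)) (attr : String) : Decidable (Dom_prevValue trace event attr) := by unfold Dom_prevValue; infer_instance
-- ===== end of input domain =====

-- B replaces A's forward scan with a state flag by a locate-cutoff-then-backward-scan; same cost, different traversal (alternative).
-- Events are Python dicts: each List (String × String) is read through PySem.Dict.ofList, and 'ev == event'
-- is Python dict equality (order-insensitive: same key set and same values), shared by both ports as pyDictEq.

-- ===== PORT A =====
-- Python dict equality of the dicts built from the two pair lists (exact: keys as a set, values via get?).
def pyDictEq (x y : List (String × String)) : Bool :=
  let dx := PySem.Dict.ofList x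
  let dy := PySem.Dict.ofList y
  PySem.Set.equal dx.keys dy.keys && dx.keys.all (fun k => dx.get? k == dy.get? k)

-- the for-loop of A: accumulator attr_Value and the `before` flag
def prevValueGo (trace : List (List (String × String))) (event : List (String × String)) (attr : String) (attrValue : String) (before : Bool) : String :=
  match trace with
  | [] => attrValue
  | ev :: rest =>
    let before' := if pyDictEq ev event then false else before
    if before' then
      prevValueGo rest event attr
        (if (PySem.Dict.ofList ev).contains attr then (PySem.Dict.ofList ev).getD attr "" else attrValue)
        before'
    else attrValue

def prevValue (trace : List (List (String × String))) (event : List (String × String)) (attr : String) : String :=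
  prevValueGo trace event attr "NotAssigned" true

-- ===== PORT B =====
-- index of the first event equal (as a dict) to `event`, or the trace length if absent
def prevValueCut (trace : List (List (String × String))) (event : List (String × String)) : Nat :=
  match trace with
  | [] => 0
  | ev :: rest => if pyDictEq ev event then 0 else prevValueCut rest event + 1

def prevValue_alt (trace : List (List (String × String))) (event : List (String × String)) (attr : String) : String :=
  match ((trace.take (prevValueCut trace event)).reverse.find?
          (fun ev => (PySem.Dict.ofList ev).contains attr)) with
  | some ev => (PySem.Dict.ofList ev).getD attr ""
  | none => "NotAssigned"

-- ===== PRECONDITION & SPEC =====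
def Spec_prevValue (trace : List (List (String × String))) (event : List (String × String)) (attr : String) (out : String) : Prop := out = prevValue_alt trace event attr
instance (trace : List (List (String × String))) (event : List (String × String)) (attr : String) (out : String) : Decidable (Spec_prevValue trace event attr out) := by unfold Spec_prevValue; infer_instance

-- ===== CLAIM (what is proved, stated in full; the proofs are below) =====
def Claim_equal_prevValue : Prop := ∀ (trace : List (List (String × String))) (event : List (String × String)) (attr : String), Dom_prevValue trace event attr → Spec_prevValue trace event attr (prevValue trace event attr)

-- ===== LEMMAS AND PROOFS =====
-- loop invariant: A's loop with accumulator acc equals B's backward scan of the cutoff prefix with fallback acc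
theorem prevValueGo_eq (trace : List (List (String × String))) (event : List (String × String))
    (attr : String) (acc : String) :
    prevValueGo trace event attr acc true =
      (match ((trace.take (prevValueCut trace event)).reverse.find?
                (fun ev => (PySem.Dict.ofList ev).contains attr)) with
       | some ev => (PySem.Dict.ofList ev).getD attr ""
       | none => acc) := by
  induction trace generalizing acc with
  | nil => simp [prevValueGo, prevValueCut]
  | cons ev rest ih =>
    by_cases h : pyDictEq ev event = true
    · simp [prevValueGo, prevValueCut, h]
    · simp only [prevValueGo, prevValueCut, h, Bool.false_eq_true, if_false,
        List.take_succ_cons, List.reverse_cons, List.find?_append, if_true]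
      rw [ih]
      cases ((rest.take (prevValueCut rest event)).reverse.find?
          (fun ev => (PySem.Dict.ofList ev).contains attr)) <;>
        by_cases hc : (PySem.Dict.ofList ev).contains attr = true <;>
        simp [List.find?, hc]

-- ===== VERDICT (by name: the statement is the Claim_ definition above) =====
theorem prevValue_spec : Claim_equal_prevValue := by
  intro trace event attr _
  unfold Spec_prevValue prevValue prevValue_alt
  exact prevValueGo_eq trace event attr "NotAssigned"
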